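-- pv_equiv track=rewrite | github.com/amdson/go_bench | src/go_bench/processing.py | enforce_threshold
-- ===== SOURCE A (Python) =====
-- def enforce_threshold(annotation_count_dict, filter_set, threshold):
--     term_list = []
--     for term, count in annotation_count_dict.items():
--         if(term in filter_set):
--             term_list.append((count, term))
--     term_list.sort(reverse=True)
--     i = 0
--     while i < len(term_list) and term_list[i][0] >= threshold:
--         i += 1
--     return [x[1] for x in term_list[:i]]
-- ===== SOURCE B (Python) =====
-- def enforce_threshold(annotation_count_dict, filter_set, threshold):
--     fs = set(filter_set)
--     buckets = {}
--     for term, count in annotation_count_dict.items():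
--         if count >= threshold and term in fs:
--             buckets[count] = buckets.get(count, []) + [term]
--     out = []
--     for count in sorted(buckets, reverse=True):
--         out.extend(sorted(buckets[count], reverse=True))
--     return out
-- ===== Notes on version B (the rewrite author's own statement) =====
-- stated objective: alternative
-- what changed: Replaces A's sort of (count,term) tuples plus boundary while-scan and prefix slice by a group-by: qualifying terms are bucketed in a dict keyed by count, then the distinct counts are sorted descending and each bucket's terms are sorted descending and concatenated.
import Mathlib
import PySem

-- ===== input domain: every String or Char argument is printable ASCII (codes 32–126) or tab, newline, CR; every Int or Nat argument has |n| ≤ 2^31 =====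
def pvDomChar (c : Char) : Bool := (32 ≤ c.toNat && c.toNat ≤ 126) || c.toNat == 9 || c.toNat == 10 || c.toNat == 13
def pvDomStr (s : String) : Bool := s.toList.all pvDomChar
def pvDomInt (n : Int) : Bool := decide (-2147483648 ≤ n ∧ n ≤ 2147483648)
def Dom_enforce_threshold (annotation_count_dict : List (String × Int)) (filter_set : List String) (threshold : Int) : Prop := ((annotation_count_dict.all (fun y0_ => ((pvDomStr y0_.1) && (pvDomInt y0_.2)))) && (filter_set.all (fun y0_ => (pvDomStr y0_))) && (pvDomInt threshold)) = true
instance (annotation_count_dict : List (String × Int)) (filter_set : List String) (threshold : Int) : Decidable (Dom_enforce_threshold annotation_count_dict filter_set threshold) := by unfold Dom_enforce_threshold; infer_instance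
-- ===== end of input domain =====

-- B replaces A's tuple sort + boundary while-scan + prefix slice by a group-by-count
-- bucket dict: sort the distinct counts descending, sort each bucket's terms descending,
-- concatenate — an alternative algorithm of the same cost.

-- ===== PORT A =====
-- the 'while i < len(term_list) and term_list[i][0] >= threshold: i += 1' loop, verbatim
def pvWhileA (tl : List (Int × String)) (threshold : Int) (i : Nat) : Nat :=
  if h : i < tl.length then
    if threshold ≤ (tl[i]).1 then pvWhileA tl threshold (i + 1) else i
  else i
termination_by tl.length - i

def enforce_threshold (annotation_count_dict : List (String × Int)) (filter_set : List String) (threshold : Int) : List String :=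
  -- for term, count in ….items(): if term in filter_set: term_list.append((count, term))
  let term_list := annotation_count_dict.foldl
    (fun acc p => if filter_set.contains p.1 then acc ++ [(p.2, p.1)] else acc) []
  -- term_list.sort(reverse=True): Python tuple comparison is lexicographic = toLex on Int ×ₗ String (exact on the ASCII domain)
  let term_list := PySem.List.sorted term_list (fun p => toLex p) true
  let i := pvWhileA term_list threshold 0
  -- [x[1] for x in term_list[:i]]
  (PySem.List.slice term_list none (some (i : Int))).map (fun x => x.2)

-- ===== PORT B =====
def enforce_threshold_alt (annotation_count_dict : List (String × Int)) (filter_set : List String) (threshold : Int) : List String :=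
  -- fs = set(filter_set)
  let fs := PySem.Set.ofList filter_set
  -- for term, count in ….items(): if count >= threshold and term in fs: buckets[count] = buckets.get(count, []) + [term]
  let buckets := annotation_count_dict.foldl
    (fun b p => if decide (threshold ≤ p.2) && PySem.Set.contains fs p.1
                then b.modify p.2 [] (fun l => l ++ [p.1]) else b)
    (PySem.Dict.empty : PySem.Dict Int (List String))
  -- for count in sorted(buckets, reverse=True): out.extend(sorted(buckets[count], reverse=True))
  (PySem.List.sorted buckets.keys (fun c => c) true).foldl
    (fun out c => out ++ PySem.List.sorted (buckets.getD c []) (fun t => t) true) []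

-- ===== PRECONDITION & SPEC =====
def Spec_enforce_threshold (annotation_count_dict : List (String × Int)) (filter_set : List String) (threshold : Int) (out : List String) : Prop := out = enforce_threshold_alt annotation_count_dict filter_set threshold
instance (annotation_count_dict : List (String × Int)) (filter_set : List String) (threshold : Int) (out : List String) : Decidable (Spec_enforce_threshold annotation_count_dict filter_set threshold out) := by unfold Spec_enforce_threshold; infer_instance

-- ===== CLAIM (what is proved, stated in full; the proofs are below) =====
def Claim_equal_enforce_threshold : Prop := ∀ (annotation_count_dict : List (String × Int)) (filter_set : List String) (threshold : Int), Dom_enforce_threshold annotation_count_dict filter_set threshold → Spec_enforce_threshold annotation_count_dict filter_set threshold (enforce_threshold annotation_count_dict filter_set threshold)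

-- ===== LEMMAS AND PROOFS =====

-- A's append-fold is filter-then-map
theorem pvFoldl_eq_filter_map (d : List (String × Int)) (fs : List String) (acc : List (Int × String)) :
    d.foldl (fun acc p => if fs.contains p.1 then acc ++ [(p.2, p.1)] else acc) acc
      = acc ++ (d.filter (fun p => fs.contains p.1)).map (fun p => (p.2, p.1)) := by
  induction d generalizing acc with
  | nil => simp [List.foldl]
  | cons hd tl ih =>
    rw [List.foldl_cons, List.filter_cons]
    by_cases h : fs.contains hd.1 = true
    · rw [if_pos h, ih]; simp only [List.contains_eq_mem, decide_eq_true_eq] at h; simp [h]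
    · rw [if_neg h, ih]; simp only [List.contains_eq_mem, decide_eq_true_eq] at h; simp [h]

-- the index while-loop counts the takeWhile prefix
theorem pvWhileA_eq (tl : List (Int × String)) (th : Int) (i : Nat) (hi : i ≤ tl.length) :
    pvWhileA tl th i = i + ((tl.drop i).takeWhile (fun p => decide (th ≤ p.1))).length := by
  generalize hk : tl.length - i = k
  induction k generalizing i with
  | zero =>
    have hil : i = tl.length := by omega
    subst hil
    rw [pvWhileA]
    simp
  | succ k ih =>
    have h : i < tl.length := by omega
    rw [pvWhileA, dif_pos h]
    have hd : tl.drop i = tl[i] :: tl.drop (i + 1) := List.drop_eq_getElem_cons h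
    by_cases hc : th ≤ (tl[i]).1
    · rw [if_pos hc, ih (i + 1) (by omega) (by omega), hd, List.takeWhile_cons]
      simp [hc]
      omega
    · rw [if_neg hc, hd, List.takeWhile_cons]
      simp [hc]

-- takeWhile = filter on a list sorted descending (pred is downward closed)
theorem pvTakeWhile_eq_filter (l : List (Int × String)) (th : Int)
    (h : l.Pairwise (fun a b => (toLex b : Int ×ₗ String) ≤ toLex a)) :
    l.takeWhile (fun p => decide (th ≤ p.1)) = l.filter (fun p => decide (th ≤ p.1)) := by
  induction l with
  | nil => simp
  | cons a l ih =>
    obtain ⟨h1, h2⟩ := List.pairwise_cons.mp h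
    rw [List.takeWhile_cons, List.filter_cons]
    by_cases hc : th ≤ a.1
    · simp [hc, ih h2]
    · simp only [hc, decide_false, if_false, Bool.false_eq_true]
      symm
      apply List.filter_eq_nil_iff.mpr
      intro b hb
      have hba := h1 b hb
      have : b.1 ≤ a.1 := by
        rcases Prod.Lex.toLex_le_toLex.mp hba with hlt | ⟨heq, _⟩
        · exact le_of_lt hlt
        · exact le_of_eq heq
      simp only [decide_eq_true_eq]
      omega

-- distinct keys, each covering its fiber: the flatMap of the fibers is a permutation
theorem pvPerm_flatMap_filter (K : List Int) (Q : List (Int × String))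
    (hK : K.Nodup) (hcov : ∀ p ∈ Q, p.1 ∈ K) :
    (K.flatMap (fun c => Q.filter (fun p => p.1 == c))).Perm Q := by
  induction K generalizing Q with
  | nil =>
    cases Q with
    | nil => simp
    | cons p t => exact absurd (hcov p (by simp)) (by simp)
  | cons c K' ih =>
    obtain ⟨hc, hK'⟩ := List.pairwise_cons.mp hK
    rw [List.flatMap_cons]
    have hrest : ∀ c' ∈ K', Q.filter (fun p => p.1 == c')
        = (Q.filter (fun p => !(p.1 == c))).filter (fun p => p.1 == c') := by
      intro c' hc'
      rw [List.filter_filter]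
      apply List.filter_congr
      intro p _
      by_cases hpc : p.1 = c'
      · have hne : c' ≠ c := fun h => hc c' hc' h.symm
        simp [hpc, hne]
      · simp [hpc]
    rw [List.flatMap_congr hrest]
    have hcov' : ∀ p ∈ Q.filter (fun p => !(p.1 == c)), p.1 ∈ K' := by
      intro p hp
      rw [List.mem_filter] at hp
      rcases List.mem_cons.mp (hcov p hp.1) with h | h
      · exact absurd h (by simpa using hp.2)
      · exact h
    exact ((ih (Q.filter (fun p => !(p.1 == c))) hK' hcov').append_left _).trans
      (List.filter_append_perm _ Q)

-- perm-congruence of flatMap blocks (each block permuted)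
theorem pvPerm_flatMap_congr {α β : Type} (K : List α) (f g : α → List β)
    (h : ∀ c ∈ K, (f c).Perm (g c)) : (K.flatMap f).Perm (K.flatMap g) :=
  (List.Perm.refl K).flatMap h

-- THE HEART: descending tuple sort = group by count, counts descending, terms descending within
theorem pvGroupBy (Q : List (Int × String)) :
    (PySem.List.sorted Q (fun p => (toLex p : Int ×ₗ String)) true).map (fun p => p.2)
      = (PySem.List.sorted (PySem.Set.ofList (Q.map (fun p => p.1))) (fun c => c) true).flatMap
          (fun c => PySem.List.sorted ((Q.filter (fun p => p.1 == c)).map (fun p => p.2)) (fun t => t) true) := by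
  set K := PySem.List.sorted (PySem.Set.ofList (Q.map (fun p => p.1))) (fun c => c) true with hKdef
  set L : List (Int × String) := K.flatMap
      (fun c => (PySem.List.sorted ((Q.filter (fun p => p.1 == c)).map (fun p => p.2)) (fun t => t) true).map
        (fun t => (c, t))) with hLdef
  have hKperm : K.Perm (PySem.Set.ofList (Q.map (fun p => p.1))) := PySem.List.sorted_perm _ _ _
  have hKnodup : K.Nodup := hKperm.nodup_iff.mpr (PySem.Set.nodup_ofList _)
  have hKmem : ∀ p ∈ Q, p.1 ∈ K := by
    intro p hp
    rw [hKperm.mem_iff, PySem.Set.mem_ofList]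
    exact List.mem_map_of_mem hp
  -- each L-block is a permutation of the fiber of Q at c
  have hblock : ∀ c ∈ K,
      ((PySem.List.sorted ((Q.filter (fun p => p.1 == c)).map (fun p => p.2)) (fun t => t) true).map
        (fun t => (c, t))).Perm (Q.filter (fun p => p.1 == c)) := by
    intro c _
    have h1 := (PySem.List.sorted_perm ((Q.filter (fun p => p.1 == c)).map (fun p => p.2)) (fun t => t) true).map (fun t => ((c, t) : Int × String))
    refine h1.trans ?_
    rw [List.map_map]
    have : (Q.filter (fun p => p.1 == c)).map ((fun t => ((c, t) : Int × String)) ∘ (fun p => p.2))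
        = Q.filter (fun p => p.1 == c) := by
      apply List.map_congr_left ?_ |>.trans (List.map_id _)
      intro p hp
      have : p.1 = c := by simpa using (List.mem_filter.mp hp).2
      simp [Function.comp, ← this]
    rw [this]
  have hLperm : L.Perm Q := by
    have h1 : L.Perm (K.flatMap (fun c => Q.filter (fun p => p.1 == c))) :=
      pvPerm_flatMap_congr K _ _ hblock
    exact h1.trans (pvPerm_flatMap_filter K Q hKnodup hKmem)
  -- L is pairwise descending in the lexicographic order
  have hLpair : L.Pairwise (fun a b => (toLex b : Int ×ₗ String) ≤ toLex a) := by
    rw [hLdef, List.pairwise_flatMap]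
    constructor
    · intro c _
      rw [List.pairwise_map]
      have := PySem.List.sorted_pairwise_rev ((Q.filter (fun p => p.1 == c)).map (fun p => p.2)) (fun t => t)
      refine this.imp ?_
      intro a b hba
      exact Prod.Lex.toLex_le_toLex.mpr (Or.inr ⟨rfl, hba⟩)
    · have hKpair : K.Pairwise (fun a b => b < a) := by
        have hle := PySem.List.sorted_pairwise_rev (PySem.Set.ofList (Q.map (fun p => p.1))) (fun c => c)
        rw [← hKdef] at hle
        refine (hle.and hKnodup).imp ?_
        intro a b hab
        exact lt_of_le_of_ne hab.1 (Ne.symm hab.2)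
      refine hKpair.imp ?_
      intro c₁ c₂ hlt x hx y hy
      obtain ⟨t₁, _, rfl⟩ := List.mem_map.mp hx
      obtain ⟨t₂, _, rfl⟩ := List.mem_map.mp hy
      exact Prod.Lex.toLex_le_toLex.mpr (Or.inl hlt)
  -- sorted Q reverse=True equals L
  have hmain : PySem.List.sorted Q (fun p => (toLex p : Int ×ₗ String)) true = L := by
    apply PySem.List.eq_of_perm_of_pairwise_le_of_injective
      (key := fun p : Int × String => OrderDual.toDual (toLex p : Int ×ₗ String))
    · intro a b hab
      have := OrderDual.toDual.injective hab
      exact toLex.injective this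
    · exact (PySem.List.sorted_perm Q _ true).trans hLperm.symm
    · refine (PySem.List.sorted_pairwise_rev Q (fun p => (toLex p : Int ×ₗ String))).imp ?_
      intro a b h
      exact OrderDual.toDual_le_toDual.mpr h
    · refine hLpair.imp ?_
      intro a b h
      exact OrderDual.toDual_le_toDual.mpr h
  rw [hmain, hLdef, List.map_flatMap]
  apply List.flatMap_congr
  intro c _
  rw [List.map_map]
  simp

-- set(filter_set) membership = list membership
theorem pvSetContains (fs : List String) (x : String) :
    PySem.Set.contains (PySem.Set.ofList fs) x = fs.contains x := by
  simp [PySem.Set.contains, List.contains_eq_mem, PySem.Set.mem_ofList]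

-- ===== VERDICT (by name: the statement is the Claim_ definition above) =====
theorem enforce_threshold_spec : Claim_equal_enforce_threshold := by
  intro d fs th _
  unfold Spec_enforce_threshold
  simp only [enforce_threshold, enforce_threshold_alt]
  rw [pvFoldl_eq_filter_map d fs [], List.nil_append]
  set pred : Int × String → Bool := fun p => decide (th ≤ p.1) with hpred
  set P : List (Int × String) := (d.filter (fun p => fs.contains p.1)).map (fun p => (p.2, p.1)) with hP
  set S : List (Int × String) := PySem.List.sorted P (fun p => toLex p) true with hS
  have hpair : S.Pairwise (fun a b => (toLex b : Int ×ₗ String) ≤ toLex a) :=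
    PySem.List.sorted_pairwise_rev P (fun p => toLex p)
  have hw : pvWhileA S th 0 = (S.takeWhile pred).length := by
    simpa using pvWhileA_eq S th 0 (Nat.zero_le _)
  have hslice : PySem.List.slice S none (some ((pvWhileA S th 0 : Nat) : Int))
      = S.take (pvWhileA S th 0) := PySem.List.slice_to_natCast S _
  have htake : S.take ((S.takeWhile pred).length) = S.takeWhile pred := by
    obtain ⟨t, ht⟩ := List.takeWhile_prefix (l := S) (p := pred)
    nth_rewrite 2 [← ht]
    exact List.take_left
  -- Q := the qualifying (count, term) pairs; A returns map snd (sorted Q lex reverse=True)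
  set q : String × Int → Bool := fun p => fs.contains p.1 && decide (th ≤ p.2) with hq
  set Q : List (Int × String) := (d.filter q).map (fun p => (p.2, p.1)) with hQdef
  have hQ : Q = P.filter pred := by
    rw [hQdef, hP, List.filter_map, List.filter_filter]
    apply congrArg (List.map _)
    apply List.filter_congr
    intro p _
    simp [hpred, hq, Function.comp, Bool.and_comm]
  have hSfilter : PySem.List.sorted Q (fun p => toLex p) true = S.filter pred := by
    apply PySem.List.eq_of_perm_of_pairwise_le_of_injective
      (key := fun p : Int × String => OrderDual.toDual (toLex p : Int ×ₗ String))
    · intro a b hab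
      exact toLex.injective (OrderDual.toDual.injective hab)
    · refine (PySem.List.sorted_perm Q _ true).trans ?_
      rw [hQ]
      exact ((PySem.List.sorted_perm P (fun p => toLex p) true).filter pred).symm
    · refine (PySem.List.sorted_pairwise_rev Q (fun p => toLex p)).imp ?_
      intro a b h
      exact OrderDual.toDual_le_toDual.mpr h
    · refine (hpair.filter pred).imp ?_
      intro a b h
      exact OrderDual.toDual_le_toDual.mpr h
  rw [hslice, hw, htake, pvTakeWhile_eq_filter S th hpair, ← hSfilter]
  -- B side: reduce the bucket dict to fibers of Q
  have hcond : (fun (b : PySem.Dict Int (List String)) (p : String × Int) =>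
        if decide (th ≤ p.2) && PySem.Set.contains (PySem.Set.ofList fs) p.1
        then b.modify p.2 [] (fun l => l ++ [p.1]) else b)
      = (fun b p => if q p then b.modify p.2 [] (fun l => l ++ [p.1]) else b) := by
    funext b p
    rw [pvSetContains, hq, Bool.and_comm]
  rw [hcond, PySem.List.foldl_if_eq_foldl_filter q
      (fun (b : PySem.Dict Int (List String)) p => b.modify p.2 [] (fun l => l ++ [p.1]))]
  have hfold : (d.filter q).foldl (fun (b : PySem.Dict Int (List String)) p => b.modify p.2 [] (fun l => l ++ [p.1])) PySem.Dict.empty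
      = Q.foldl (fun b p => b.modify p.1 [] (fun l => l ++ [p.2])) PySem.Dict.empty := by
    rw [hQdef, List.foldl_map]
  rw [hfold]
  set B : PySem.Dict Int (List String) := Q.foldl (fun b p => b.modify p.1 [] (fun l => l ++ [p.2])) PySem.Dict.empty with hB
  have hkeys : B.keys = PySem.Set.ofList (Q.map (fun p => p.1)) := by
    rw [hB, PySem.Dict.keys_foldl_modify_key Q (fun p => p.1) [] (fun _ p l => l ++ [p.2]) PySem.Dict.empty,
      PySem.Dict.keys_empty]
    rfl
  have hgetD : ∀ c, B.getD c [] = (Q.filter (fun p => p.1 == c)).map (fun p => p.2) := by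
    intro c
    rw [hB, PySem.Dict.getD_foldl_modify_append Q PySem.Dict.empty c, PySem.Dict.getD_empty, List.nil_append]
  rw [PySem.List.foldl_append_eq_flatMap, List.nil_append, hkeys]
  rw [List.flatMap_congr (fun c _ => by rw [hgetD c])]
  exact pvGroupBy Q
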